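-- pv_equiv track=rewrite | github.com/zohyan/window-search-in-a-genome | kmp_matcher.py | scan_genome_given_seq
-- ===== SOURCE A (Python) =====
-- def scan_genome_given_seq(genome, motif_list, window_lenght=200, stride=1, thrsehold=2):
--
--   """
--     input :
--       - genome : string representing the long string which is the genome
--       - motif_list : list of "motif" to check if it exists in a window
--       - window_lenght : length of the window where we must check the "motifs"
--       - stride : window displacement stride
--
--     Returns the window whose number of sequences present is greater than a certain threshold.
--   """
--
--   list_result = list()
--
--   lenght_result = ((len(genome) - window_lenght) / stride) + 1
--
--   for i in range(int(lenght_result)):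
--
--     nb_motif_checked = 0
--
--     for motif in motif_list:
--       if motif in genome[i:window_lenght + i]:
--         nb_motif_checked += 1
--
--     if thrsehold == nb_motif_checked:
--       list_result.append((i, window_lenght + i))
--
--   return list_result
-- ===== SOURCE B (Python) =====
-- def _occurrences(genome, motif):
--     """start positions of every occurrence of motif in genome, in increasing order"""
--     positions = []
--     start = 0
--     while start <= len(genome):
--         p = genome.find(motif, start)
--         if p == -1:
--             break
--         positions.append(p)
--         start = p + 1
--     return positions
--
--
-- def _first_at_least(a, x):
--     """index of the first element of the sorted list a that is >= x (len(a) if none)"""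
--     lo, hi = 0, len(a)
--     while lo < hi:
--         mid = (lo + hi) // 2
--         if a[mid] < x:
--             lo = mid + 1
--         else:
--             hi = mid
--     return lo
--
--
-- def scan_genome_given_seq(genome, motif_list, window_lenght=200, stride=1, thrsehold=2):
--     L = len(genome)
--     # occurrence positions of each distinct motif, computed once over the whole genome
--     occ = {}
--     for motif in motif_list:
--         if motif not in occ:
--             occ[motif] = _occurrences(genome, motif)
--     result = []
--     for i in range(int((L - window_lenght) / stride + 1)):
--         count = 0
--         for motif in motif_list:
--             positions = occ[motif]
--             j = _first_at_least(positions, i)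
--             if j < len(positions) and positions[j] <= i + window_lenght - len(motif):
--                 count += 1
--         if count == thrsehold:
--             result.append((i, window_lenght + i))
--     return result
-- ===== Notes on version B (the rewrite author's own statement) =====
-- stated objective: alternative
-- what changed: Instead of running a substring search for every motif inside every window, B precomputes for each distinct motif the list of its occurrence start positions in the whole genome once and decides each window by an in-range test on those positions; Pre_ excludes stride=0 (A raises ZeroDivisionError) and negative stride or negative window length, which are outside the task's natural domain and where A's values are artefacts of Python's negative-slice and float-division semantics.
-- outside the precondition, e.g. on scan_genome_given_seq('abc', ['a'], -1, 1, 1): A returns [(0, -1)], B returns []; on scan_genome_given_seq('ab', ['', 'a'], 5, -1, 1): A returns [(1, 6), (2, 7), (3, 8)], B returns [(1, 6), (2, 7)]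
import Mathlib
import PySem

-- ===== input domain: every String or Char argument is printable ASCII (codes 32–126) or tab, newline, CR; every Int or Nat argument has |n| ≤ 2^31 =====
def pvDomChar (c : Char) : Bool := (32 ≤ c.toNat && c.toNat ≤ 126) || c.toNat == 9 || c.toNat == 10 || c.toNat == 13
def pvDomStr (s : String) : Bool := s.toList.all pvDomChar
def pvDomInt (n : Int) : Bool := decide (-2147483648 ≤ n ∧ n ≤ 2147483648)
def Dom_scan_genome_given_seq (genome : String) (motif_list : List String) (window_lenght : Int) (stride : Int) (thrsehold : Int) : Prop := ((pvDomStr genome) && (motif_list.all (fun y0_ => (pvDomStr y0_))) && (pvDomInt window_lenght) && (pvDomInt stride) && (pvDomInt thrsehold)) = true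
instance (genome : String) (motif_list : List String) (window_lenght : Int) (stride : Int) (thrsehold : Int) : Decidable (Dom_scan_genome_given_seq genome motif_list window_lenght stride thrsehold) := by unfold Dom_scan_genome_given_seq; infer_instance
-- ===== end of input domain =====

-- B replaces A's per-window substring scans by one precomputed occurrence-position list per distinct
-- motif, then decides each window by a position-range test (objective: alternative algorithm).

-- ===== PORT A =====
-- int((len(genome) - window_lenght) / stride + 1): float division, then int() truncates toward zero; on the
-- |int| ≤ 2^31 domain this equals truncation toward zero of the exact rational (len - W + stride)/stride,
-- i.e. Int.tdiv (hand-ported here; exact on the stated domain).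
def scan_genome_given_seq (genome : String) (motif_list : List String) (window_lenght : Int) (stride : Int) (thrsehold : Int) : List (Int × Int) :=
  let g := genome.toList
  let lenght_result : Int := Int.tdiv ((g.length : Int) - window_lenght + stride) stride
  (PySem.List.pyRange 0 lenght_result 1).foldl (fun list_result i =>
    let nb_motif_checked : Int := motif_list.foldl (fun nb motif =>
      if PySem.Chars.isIn motif.toList (PySem.List.slice g (some i) (some (window_lenght + i)))
      then nb + 1 else nb) 0
    if thrsehold == nb_motif_checked then list_result ++ [(i, window_lenght + i)] else list_result) []

-- ===== PORT B =====
-- find-all loop (hand port of _occurrences: while start <= len(genome): p = genome.find(motif, start); …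
-- genome.find(motif, start) is PySem.Chars.findFrom; the while condition bounds start and gives the measure)
def pvOccFrom (g ml : List Char) (start : Nat) : List Int :=
  if hle : start ≤ g.length then
    if hq : PySem.Chars.findFrom g ml (start : Int) none = -1 then []
    else (PySem.Chars.findFrom g ml (start : Int) none) ::
         pvOccFrom g ml ((PySem.Chars.findFrom g ml (start : Int) none).toNat + 1)
  else []
termination_by g.length + 1 - start
decreasing_by
  have h1 := PySem.Chars.findFrom_natCast g ml start hle
  by_cases hf : PySem.Chars.find (g.drop start) ml = -1
  · rw [h1, if_pos hf] at hq; exact absurd rfl hq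
  · have h2 := PySem.Chars.find_le_length (g.drop start) ml
    have h3 := PySem.Chars.neg_one_le_find (g.drop start) ml
    rw [List.length_drop] at h2
    rw [h1, if_neg hf]
    omega

-- binary search: index of the first element ≥ x (hand port of _first_at_least; the while loop becomes
-- recursion on (lo, hi); a[mid] with lo ≤ mid < hi ≤ len is always in range, so List.getD is exact there)
def pvFirstAtLeast (a : List Int) (x : Int) (lo hi : Nat) : Nat :=
  if h : lo < hi then
    if a.getD ((lo + hi) / 2) 0 < x then pvFirstAtLeast a x ((lo + hi) / 2 + 1) hi
    else pvFirstAtLeast a x lo ((lo + hi) / 2)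
  else lo
termination_by hi - lo
decreasing_by all_goals omega

def scan_genome_given_seq_alt (genome : String) (motif_list : List String) (window_lenght : Int) (stride : Int) (thrsehold : Int) : List (Int × Int) :=
  let g := genome.toList
  let L : Int := g.length
  let occ : PySem.Dict String (List Int) := motif_list.foldl
    (fun d motif => if d.contains motif then d else d.insert motif (pvOccFrom g motif.toList 0)) PySem.Dict.empty
  -- same int((L - window_lenght) / stride + 1) as in Source B, hand-ported as truncating division (see Port A)
  (PySem.List.pyRange 0 (Int.tdiv (L - window_lenght + stride) stride) 1).foldl (fun result i =>
    let count : Int := motif_list.foldl (fun c motif =>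
      let positions := occ.getD motif []
      let j := pvFirstAtLeast positions i 0 positions.length
      if decide (j < positions.length) && decide (positions.getD j 0 ≤ i + window_lenght - (motif.toList.length : Int))
      then c + 1 else c) 0
    if count == thrsehold then result ++ [(i, window_lenght + i)] else result) []

-- ===== PRECONDITION & SPEC =====
-- stride = 0 makes A raise ZeroDivisionError; a negative stride or a negative window length are outside
-- the task's natural domain (a window scan moves forward over a nonnegative-length window), and A's values
-- there are artefacts of Python's negative-slice and float-division semantics; Pre_ excludes exactly these.
def Pre_scan_genome_given_seq (genome : String) (motif_list : List String) (window_lenght : Int) (stride : Int) (thrsehold : Int) : Prop := 1 ≤ stride ∧ 0 ≤ window_lenght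
instance (genome : String) (motif_list : List String) (window_lenght : Int) (stride : Int) (thrsehold : Int) : Decidable (Pre_scan_genome_given_seq genome motif_list window_lenght stride thrsehold) := by unfold Pre_scan_genome_given_seq; infer_instance
def pvWitness_scan_genome_given_seq : String × List String × Int × Int × Int := ("abcab", ["ab", "c"], 3, 1, 2)

def Spec_scan_genome_given_seq (genome : String) (motif_list : List String) (window_lenght : Int) (stride : Int) (thrsehold : Int) (out : List (Int × Int)) : Prop := out = scan_genome_given_seq_alt genome motif_list window_lenght stride thrsehold
instance (genome : String) (motif_list : List String) (window_lenght : Int) (stride : Int) (thrsehold : Int) (out : List (Int × Int)) : Decidable (Spec_scan_genome_given_seq genome motif_list window_lenght stride thrsehold out) := by unfold Spec_scan_genome_given_seq; infer_instance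

-- ===== CLAIM (what is proved, stated in full; the proofs are below) =====
def Claim_equal_scan_genome_given_seq : Prop := ∀ (genome : String) (motif_list : List String) (window_lenght : Int) (stride : Int) (thrsehold : Int), Dom_scan_genome_given_seq genome motif_list window_lenght stride thrsehold → Pre_scan_genome_given_seq genome motif_list window_lenght stride thrsehold → Spec_scan_genome_given_seq genome motif_list window_lenght stride thrsehold (scan_genome_given_seq genome motif_list window_lenght stride thrsehold)

-- ===== LEMMAS AND PROOFS =====

-- the occurrence list of B's find-loop, re-stated as the filter of a range (proof-side characterisation)
def pvOcc (g : List Char) (motif : List Char) : List Int :=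
  (PySem.List.pyRange 0 ((g.length : Int) - motif.length + 1) 1).filter
    (fun p => PySem.List.slice g (some p) (some (p + motif.length)) == motif)

theorem slice_eq_iff_prefix (g ml : List Char) (p : Nat) :
    (PySem.List.slice g (some (p : Int)) (some ((p : Int) + (ml.length : Int))) = ml) ↔ ml <+: g.drop p := by
  rw [PySem.List.slice_natCast_add g p ml.length]
  constructor
  · intro he; exact he ▸ List.take_prefix _ _
  · intro hp; exact (List.prefix_iff_eq_take.mp hp).symm

theorem filter_nil_of_no_prefix (g ml : List Char) (a b : Int) (h0 : 0 ≤ a)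
    (hno : ∀ i : Nat, a ≤ (i : Int) → (i : Int) < b → ¬ ml <+: g.drop i) :
    (PySem.List.pyRange a b 1).filter
      (fun p => PySem.List.slice g (some p) (some (p + (ml.length : Int))) == ml) = [] := by
  rw [List.filter_eq_nil_iff]
  intro p hp
  obtain ⟨h1, h2, _⟩ := (PySem.List.mem_pyRange_iff_of_pos (by norm_num : (0:Int) < 1) p).mp hp
  simp only [beq_iff_eq]
  intro hsl
  have hp0 : 0 ≤ p := le_trans h0 h1
  have htn : ((p.toNat : Nat) : Int) = p := Int.toNat_of_nonneg hp0
  rw [← htn] at hsl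
  exact hno p.toNat (by omega) (by omega) ((slice_eq_iff_prefix g ml p.toNat).mp hsl)

theorem pvOccFrom_eq_filter (g ml : List Char) :
    ∀ (n : Nat) (start : Nat), g.length + 1 - start ≤ n →
    pvOccFrom g ml start = (PySem.List.pyRange (start : Int) ((g.length : Int) - ml.length + 1) 1).filter
      (fun p => PySem.List.slice g (some p) (some (p + ml.length)) == ml) := by
  intro n
  induction n with
  | zero =>
    intro start h
    have hgt : ¬ start ≤ g.length := by omega
    rw [pvOccFrom, dif_neg hgt, PySem.List.pyRange_one_eq_nil (by push_cast; omega)]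
    rfl
  | succ n ih =>
    intro start h
    by_cases hle : start ≤ g.length
    · rw [pvOccFrom, dif_pos hle]
      have h1 := PySem.Chars.findFrom_natCast g ml start hle
      by_cases hf : PySem.Chars.find (g.drop start) ml = -1
      · rw [dif_pos (by rw [h1, if_pos hf])]
        symm
        apply filter_nil_of_no_prefix g ml _ _ (by positivity)
        intro i hi _ hpre
        apply (PySem.Chars.find_eq_neg_one_iff (g.drop start) ml).mp hf
        have hdd : g.drop i = (g.drop start).drop (i - start) := by
          rw [List.drop_drop]; congr 1; omega
        rw [hdd] at hpre
        exact hpre.isInfix.trans (List.drop_suffix _ _).isInfix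
      · have hfneg := PySem.Chars.neg_one_le_find (g.drop start) ml
        have hq : PySem.Chars.findFrom g ml (start : Int) none ≠ -1 := by
          rw [h1, if_neg hf]; intro hcon; omega
        rw [dif_neg hq]
        obtain ⟨hkq, hpref, hmin⟩ := PySem.Chars.findFrom_natCast_spec g ml start hle hq
        set q := PySem.Chars.findFrom g ml (start : Int) none with hqdef
        have hqval : q = start + PySem.Chars.find (g.drop start) ml := by rw [h1, if_neg hf]
        have hfle := PySem.Chars.find_le_length (g.drop start) ml
        rw [List.length_drop] at hfle
        have hq0 : 0 ≤ q := by omega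
        have htn : ((q.toNat : Nat) : Int) = q := Int.toNat_of_nonneg hq0
        have hqm : q + (ml.length : Int) ≤ (g.length : Int) := by
          have hl := hpref.length_le
          rw [List.length_drop] at hl
          omega
        rw [PySem.List.pyRange_one_append (start : Int) q ((g.length : Int) - ml.length + 1) hkq (by omega),
            List.filter_append,
            PySem.List.pyRange_one_cons (by omega : q < (g.length : Int) - ml.length + 1),
            List.filter_cons]
        have hfil1 : (PySem.List.pyRange (start : Int) q 1).filter
            (fun p => PySem.List.slice g (some p) (some (p + (ml.length : Int))) == ml) = [] := by
          apply filter_nil_of_no_prefix g ml _ _ (by positivity)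
          intro i hi hib hpre
          exact hmin i (by omega) (by omega) hpre
        have hpq : (PySem.List.slice g (some q) (some (q + (ml.length : Int))) == ml) = true := by
          rw [beq_iff_eq, ← htn]
          exact (slice_eq_iff_prefix g ml q.toNat).mpr hpref
        rw [hfil1, hpq]
        simp only [List.nil_append, if_true]
        congr 1
        rw [ih (q.toNat + 1) (by omega)]
        congr 1
        push_cast [htn]
        ring_nf
    · rw [pvOccFrom, dif_neg hle, PySem.List.pyRange_one_eq_nil (by push_cast; omega)]
      rfl

theorem pvOccFrom_eq_pvOcc (g ml : List Char) : pvOccFrom g ml 0 = pvOcc g ml := by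
  rw [pvOcc, pvOccFrom_eq_filter g ml (g.length + 1) 0 (by omega)]
  norm_num

-- the dict-building loop of B, as a named helper for the induction
def pvOccDict (g : List Char) (l : List String) (d : PySem.Dict String (List Int)) : PySem.Dict String (List Int) :=
  l.foldl (fun d motif => if d.contains motif then d else d.insert motif (pvOcc g motif.toList)) d

theorem pvOccDict_sound (g : List Char) (l : List String) (d : PySem.Dict String (List Int))
    (hd : ∀ k, d.contains k = true → d.getD k [] = pvOcc g k.toList) :
    ∀ k, (pvOccDict g l d).contains k = true → (pvOccDict g l d).getD k [] = pvOcc g k.toList := by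
  induction l generalizing d with
  | nil => exact hd
  | cons m rest ih =>
    show ∀ k, (pvOccDict g rest (if d.contains m then d else d.insert m (pvOcc g m.toList))).contains k = true → _
    apply ih
    intro k hk
    by_cases hc : d.contains m = true
    · simp only [hc, if_true] at hk ⊢; exact hd k hk
    · simp only [Bool.not_eq_true] at hc
      simp only [hc, Bool.false_eq_true, if_false] at hk ⊢
      rw [PySem.Dict.contains_insert] at hk
      rw [PySem.Dict.getD_insert]
      by_cases he : k = m
      · subst he; simp
      · rw [if_neg he]
        simp only [Bool.or_eq_true, beq_iff_eq] at hk
        exact hd k (hk.resolve_left he)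

theorem pvOccDict_mono (g : List Char) (l : List String) (d : PySem.Dict String (List Int)) (k : String)
    (hk : d.contains k = true) : (pvOccDict g l d).contains k = true := by
  induction l generalizing d with
  | nil => exact hk
  | cons m rest ih =>
    show (pvOccDict g rest _).contains k = true
    apply ih
    by_cases hc : d.contains m = true
    · simpa [hc] using hk
    · simp only [Bool.not_eq_true] at hc
      simp [hc, PySem.Dict.contains_insert, hk]

theorem pvOccDict_contains (g : List Char) (l : List String) (d : PySem.Dict String (List Int)) :
    ∀ k ∈ l, (pvOccDict g l d).contains k = true := by
  induction l generalizing d with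
  | nil => intro k hk; cases hk
  | cons m rest ih =>
    intro k hk
    show (pvOccDict g rest _).contains k = true
    rcases List.mem_cons.mp hk with he | hm
    · subst he
      apply pvOccDict_mono
      by_cases hc : d.contains k = true
      · simp [hc]
      · simp only [Bool.not_eq_true] at hc
        simp [hc, PySem.Dict.contains_insert]
    · exact ih _ k hm

-- A's membership test on the window slice, characterised by occurrence positions in the full genome
theorem isIn_slice_iff (g ml : List Char) (hml : ml ≠ []) (i b : Int) (hi0 : 0 ≤ i) :
    PySem.Chars.isIn ml (PySem.List.slice g (some i) (some b)) = true ↔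
    ∃ p : Int, 0 ≤ p ∧ p < (g.length : Int) - ml.length + 1 ∧
      PySem.List.slice g (some p) (some (p + ml.length)) = ml ∧
      i ≤ p ∧ p + (ml.length : Int) ≤ min (max (if b < 0 then b + (g.length : Int) else b) 0) (g.length : Int) := by
  lift i to Nat using hi0 with a
  have hm : 0 < ml.length := List.length_pos_iff.mpr hml
  have hslice : PySem.List.slice g (some (a : Int)) (some b) =
      (g.drop (PySem.List.clampIdx g.length (a : Int))).take
        (PySem.List.clampIdx g.length b - PySem.List.clampIdx g.length (a : Int)) := by
    simp [PySem.List.slice]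
  have hβcast : ((PySem.List.clampIdx g.length b : Nat) : Int) =
      min (max (if b < 0 then b + (g.length : Int) else b) 0) (g.length : Int) := by
    simp [PySem.List.clampIdx]; omega
  have hα : PySem.List.clampIdx g.length (a : Int) = min a g.length := by
    simp [PySem.List.clampIdx]; try omega
  set L := g.length with hL
  set m := ml.length with hmdef
  set β := PySem.List.clampIdx L b with hβdef
  have hβL : β ≤ L := by
    have : ((β : Nat) : Int) ≤ (L : Int) := by rw [hβcast]; exact min_le_right _ _
    exact_mod_cast this
  rw [hslice, hα, ← PySem.Chars.exists_prefix_drop_iff_isIn]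
  constructor
  · rintro ⟨j, hpre⟩
    rw [List.drop_take, List.drop_drop] at hpre
    obtain ⟨hpre, hjlen⟩ := List.prefix_take_iff.mp hpre
    have hq : ml = (g.drop (min a L + j)).take m := List.prefix_iff_eq_take.mp hpre
    have hqL : m ≤ L - (min a L + j) := by
      have := hpre.length_le
      simpa [hmdef, hL] using this
    refine ⟨((min a L + j : Nat) : Int), by positivity, ?_, ?_, ?_, ?_⟩
    · push_cast; omega
    · have : PySem.List.slice g (some ((min a L + j : Nat) : Int))
          (some (((min a L + j : Nat) : Int) + (m : Nat))) = (g.drop (min a L + j)).take m :=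
        PySem.List.slice_natCast_add g (min a L + j) m
      rw [this]; exact hq.symm
    · push_cast; omega
    · rw [← hβcast]; push_cast; omega
  · rintro ⟨p, hp0, hplt, hpslice, hip, hpb⟩
    lift p to Nat using hp0 with q
    rw [← hβcast] at hpb
    have hipq : a ≤ q := by exact_mod_cast hip
    have hqb : q + m ≤ β := by exact_mod_cast hpb
    have hslice2 : PySem.List.slice g (some (q : Int)) (some ((q : Int) + (m : Nat))) =
        (g.drop q).take m := PySem.List.slice_natCast_add g q m
    rw [hslice2] at hpslice
    refine ⟨q - min a L, ?_⟩
    rw [List.drop_take, List.drop_drop]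
    have hmin : min a L ≤ q := le_trans (min_le_left _ _) hipq
    rw [Nat.add_sub_cancel' hmin]
    apply List.prefix_take_iff.mpr
    refine ⟨List.prefix_iff_eq_take.mpr hpslice.symm, ?_⟩
    omega

theorem pv_bool_eq_of_iff (x y : Bool) (h : x = true ↔ y = true) : x = y := by
  cases x <;> cases y <;> simp_all

theorem occ_getD (g : List Char) (full : List String) :
    ∀ k ∈ full, (full.foldl (fun d motif => if d.contains motif then d else d.insert motif (pvOcc g motif.toList)) PySem.Dict.empty).getD k [] = pvOcc g k.toList := by
  intro k hk
  exact pvOccDict_sound g full PySem.Dict.empty (by simp [PySem.Dict.contains_empty]) k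
    (pvOccDict_contains g full PySem.Dict.empty k hk)

-- the binary-search result characterised on a (≤)-sorted list
theorem pvFirstAtLeast_bounds (a : List Int) (x : Int)
    (hsort : ∀ k1 k2, k1 ≤ k2 → k2 < a.length → a.getD k1 0 ≤ a.getD k2 0) :
    ∀ n lo hi, hi - lo ≤ n → lo ≤ hi → hi ≤ a.length →
      (∀ k, k < lo → a.getD k 0 < x) → (∀ k, hi ≤ k → k < a.length → x ≤ a.getD k 0) →
      (∀ k, k < pvFirstAtLeast a x lo hi → a.getD k 0 < x) ∧
      (∀ k, pvFirstAtLeast a x lo hi ≤ k → k < a.length → x ≤ a.getD k 0) := by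
  intro n
  induction n with
  | zero =>
    intro lo hi h1 h2 h3 hLO hHI
    have hnlt : ¬ lo < hi := by omega
    rw [pvFirstAtLeast, dif_neg hnlt]
    exact ⟨hLO, fun k hk1 hk2 => hHI k (by omega) hk2⟩
  | succ n ih =>
    intro lo hi h1 h2 h3 hLO hHI
    by_cases hlt : lo < hi
    · rw [pvFirstAtLeast, dif_pos hlt]
      by_cases hm : a.getD ((lo + hi) / 2) 0 < x
      · rw [if_pos hm]
        refine ih ((lo + hi) / 2 + 1) hi (by omega) (by omega) h3 ?_ hHI
        intro k hk
        exact lt_of_le_of_lt (hsort k ((lo + hi) / 2) (by omega) (by omega)) hm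
      · rw [if_neg hm]
        refine ih lo ((lo + hi) / 2) (by omega) (by omega) (by omega) hLO ?_
        intro k hk1 hk2
        exact le_trans (not_lt.mp hm) (hsort ((lo + hi) / 2) k hk1 hk2)
    · rw [pvFirstAtLeast, dif_neg hlt]
      exact ⟨hLO, fun k hk1 hk2 => hHI k (by omega) hk2⟩

-- B's per-motif test (binary search + range check) finds exactly "some occurrence inside the window"
theorem bisect_cond_iff (a : List Int) (x B : Int) (hsort : a.Pairwise (· ≤ ·)) :
    ((decide (pvFirstAtLeast a x 0 a.length < a.length) &&
      decide (a.getD (pvFirstAtLeast a x 0 a.length) 0 ≤ B)) = true)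
    ↔ ∃ p ∈ a, x ≤ p ∧ p ≤ B := by
  have hsort' : ∀ k1 k2, k1 ≤ k2 → k2 < a.length → a.getD k1 0 ≤ a.getD k2 0 := by
    intro k1 k2 hle hk2
    rcases eq_or_lt_of_le hle with rfl | hlt
    · exact le_refl _
    · rw [List.getD_eq_getElem a 0 (by omega), List.getD_eq_getElem a 0 hk2]
      exact List.pairwise_iff_getElem.mp hsort k1 k2 (by omega) hk2 hlt
  obtain ⟨hlo, hhi⟩ := pvFirstAtLeast_bounds a x hsort' a.length 0 a.length (by omega) (by omega)
    (le_refl _) (fun k hk => absurd hk (Nat.not_lt_zero k)) (fun k hk1 hk2 => absurd hk1 (by omega))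
  set j := pvFirstAtLeast a x 0 a.length with hj
  simp only [Bool.and_eq_true, decide_eq_true_eq]
  constructor
  · rintro ⟨hjl, hjB⟩
    refine ⟨a.getD j 0, ?_, hhi j (le_refl _) hjl, hjB⟩
    rw [List.getD_eq_getElem a 0 hjl]
    exact List.getElem_mem hjl
  · rintro ⟨p, hmem, hxp, hpB⟩
    obtain ⟨k, hk, rfl⟩ := List.mem_iff_getElem.mp hmem
    have hkd : a.getD k 0 = a[k] := List.getD_eq_getElem a 0 hk
    have hjk : j ≤ k := by
      by_contra hnk
      have := hlo k (by omega)
      rw [hkd] at this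
      omega
    have hjl : j < a.length := lt_of_le_of_lt hjk hk
    refine ⟨hjl, le_trans ?_ hpB⟩
    rw [← hkd]
    exact hsort' j k hjk hk

theorem pvOcc_pairwise (g ml : List Char) : (pvOcc g ml).Pairwise (· ≤ ·) := by
  unfold pvOcc
  exact ((PySem.List.pairwise_lt_pyRange_one _ _).filter _).imp (fun h => le_of_lt h)

-- A's per-motif step equals B's per-motif step, for every in-range window [i, i+W] ⊆ [0, L]
theorem step_eq (g : List Char) (full : List String) (i W : Int) (hi0 : 0 ≤ i)
    (hW : 0 ≤ W) (hiW : i + W ≤ (g.length : Int)) (motif : String) (hmem : motif ∈ full) (c : Int) :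
    (if PySem.Chars.isIn motif.toList (PySem.List.slice g (some i) (some (W + i))) then c + 1 else c)
    = (let positions := (full.foldl (fun d motif => if d.contains motif then d else d.insert motif (pvOccFrom g motif.toList 0)) PySem.Dict.empty).getD motif []
       let j := pvFirstAtLeast positions i 0 positions.length
       if decide (j < positions.length) && decide (positions.getD j 0 ≤ i + W - (motif.toList.length : Int))
       then c + 1 else c) := by
  simp only [pvOccFrom_eq_pvOcc, occ_getD g full motif hmem]
  have hcond := bisect_cond_iff (pvOcc g motif.toList) i (i + W - (motif.toList.length : Int))
    (pvOcc_pairwise g motif.toList)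
  by_cases hemp : motif = ""
  · subst hemp
    have hA : PySem.Chars.isIn "".toList (PySem.List.slice g (some i) (some (W + i))) = true := by
      show PySem.Chars.isIn [] _ = true
      simp [PySem.Chars.isIn_nil]
    have hB : ∃ p ∈ pvOcc g "".toList, i ≤ p ∧ p ≤ i + W - ("".toList.length : Int) := by
      show ∃ p ∈ pvOcc g [], i ≤ p ∧ p ≤ i + W - (([] : List Char).length : Int)
      refine ⟨i, ?_, le_refl _, by simp; omega⟩
      rw [pvOcc]
      apply List.mem_filter.mpr
      refine ⟨?_, ?_⟩
      · rw [PySem.List.mem_pyRange_iff_of_pos (by norm_num : (0:Int) < 1)]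
        refine ⟨hi0, by simp; omega, by simp⟩
      · simp [PySem.List.slice]
    rw [hA, hcond.mpr hB]
  · have hne : motif.toList ≠ [] := by
      intro h; apply hemp; rw [← String.toList_inj]; simp [h]
    have hb0 : ¬ (W + i < 0) := by omega
    have hiff := isIn_slice_iff g motif.toList hne i (W + i) hi0
    have hminmax : min (max (if W + i < 0 then W + i + (g.length : Int) else W + i) 0) (g.length : Int) = W + i := by
      rw [if_neg hb0]; omega
    rw [hminmax] at hiff
    have hex : (∃ p ∈ pvOcc g motif.toList, i ≤ p ∧ p ≤ i + W - (motif.toList.length : Int))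
        ↔ ∃ p : Int, 0 ≤ p ∧ p < (g.length : Int) - motif.toList.length + 1 ∧
            PySem.List.slice g (some p) (some (p + motif.toList.length)) = motif.toList ∧
            i ≤ p ∧ p + (motif.toList.length : Int) ≤ W + i := by
      simp only [pvOcc, List.mem_filter, beq_iff_eq]
      constructor
      · rintro ⟨p, ⟨hp1, hp2⟩, hp3, hp4⟩
        have hr := (PySem.List.mem_pyRange_iff_of_pos (by norm_num : (0:Int) < 1) p).mp hp1
        exact ⟨p, by omega, by omega, hp2, hp3, by omega⟩
      · rintro ⟨p, hp0, hplt, hps, hip, hpb⟩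
        refine ⟨p, ⟨?_, hps⟩, hip, by omega⟩
        rw [PySem.List.mem_pyRange_iff_of_pos (by norm_num : (0:Int) < 1)]
        exact ⟨hp0, by omega, by simp⟩
    rw [pv_bool_eq_of_iff _ _ (hiff.trans (hex.symm.trans hcond.symm))]

-- every window produced by the range formula lies inside the genome (stride ≥ 1, window length ≥ 0)
theorem window_in_range (L W s i : Int) (hs : 1 ≤ s) (h0 : 0 ≤ i)
    (hlt : i < Int.tdiv (L - W + s) s) : i + W ≤ L := by
  by_cases ha : 0 ≤ L - W + s
  · rw [Int.tdiv_eq_ediv_of_nonneg ha] at hlt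
    have hmod := Int.emod_add_mul_ediv (L - W + s) s
    have hmn : 0 ≤ (L - W + s) % s := Int.emod_nonneg _ (by omega)
    set n := (L - W + s) / s with hn
    have hn1 : i ≤ n - 1 := by omega
    have h3 : (n - 1 : Int) ≤ s * (n - 1) := le_mul_of_one_le_left (by omega) hs
    nlinarith [hmod, hmn, h3]
  · have h1 : 0 ≤ Int.tdiv (-(L - W + s)) s := Int.tdiv_nonneg (by omega) (by omega)
    rw [Int.neg_tdiv] at h1
    omega

theorem main_eq (genome : String) (motif_list : List String) (window_lenght stride thrsehold : Int)
    (hs : 1 ≤ stride) (hW : 0 ≤ window_lenght) :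
    scan_genome_given_seq genome motif_list window_lenght stride thrsehold
    = scan_genome_given_seq_alt genome motif_list window_lenght stride thrsehold := by
  simp only [scan_genome_given_seq, scan_genome_given_seq_alt]
  refine PySem.List.foldl_congr_mem _ _ _ _ ?_
  intro acc i hi
  have hr := (PySem.List.mem_pyRange_iff_of_pos (by norm_num : (0:Int) < 1) i).mp hi
  have hi0 : 0 ≤ i := by omega
  have hiW : i + window_lenght ≤ (genome.toList.length : Int) :=
    window_in_range _ _ _ _ hs hi0 (by omega)
  have hcnt := PySem.List.foldl_congr_mem motif_list _ _ (0 : Int)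
    (fun c motif hm => step_eq genome.toList motif_list i window_lenght hi0 hW hiW motif hm c)
  rw [← hcnt]
  rcases eq_or_ne thrsehold (motif_list.foldl (fun nb motif =>
      if PySem.Chars.isIn motif.toList (PySem.List.slice genome.toList (some i) (some (window_lenght + i)))
      then nb + 1 else nb) 0) with h | h
  · simp [← h]
  · simp [beq_iff_eq, h, (h.symm : _ ≠ thrsehold)]

-- ===== VERDICT (by name: the statement is the Claim_ definition above) =====
theorem scan_genome_given_seq_spec : Claim_equal_scan_genome_given_seq := by
  intro genome motif_list window_lenght stride thrsehold _ hpre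
  exact main_eq genome motif_list window_lenght stride thrsehold hpre.1 hpre.2
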